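-- pv_equiv track=rewrite | github.com/maloneytc/AMBRA_Backups | AMBRA_Backups/redcap_funcs.py | details_to_dict
-- ===== SOURCE A (Python) =====
-- def details_to_dict(log_details):
--     """
--     Converts log details string into dictionary of questions and values
--     Splits on '=' because ',' can be used in comment fields, so not reliable to split on
--     """
--
--     # repalcements
--     log_details = log_details.replace("unchecked", "0").replace("checked", "1")
--
--     questions = {}
--     strings = log_details.split("=")
--
--     if len(strings) == 2:
--         questions[strings[0].strip()] = strings[1].strip().strip("'")
--         return questions
--
--     for i in range(0, len(strings) - 1):
--         if i == 0:
--             questions[strings[i].strip()] = ",".join(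
--                 strings[i + 1].split(",")[:-1]
--             ).strip()
--         elif i == len(strings) - 2:
--             questions[strings[i].split(",")[-1].strip()] = strings[i + 1].strip()
--         else:
--             questions[strings[i].split(",")[-1].strip()] = ",".join(
--                 strings[i + 1].split(",")[:-1]
--             ).strip()
--
--     # removing extra 's from questions without removing purposeful 's
--     for question in questions:
--         questions[question] = questions[question].strip("'")
--
--     return questions
-- ===== SOURCE B (Python) =====
-- def details_to_dict(log_details):
--     """Character-level state machine: one scan over the string tracking the current
--     chunk buffer and the position of its last comma; no split() calls at all."""
--     s = log_details.replace("unchecked", "0").replace("checked", "1")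
--     questions = {}
--     key = None
--     buf = []          # characters of the chunk being read
--     last_comma = None # index in buf of the most recent ','
--     for ch in s:
--         if ch == '=':
--             if key is None:
--                 key = ''.join(buf).strip()
--             else:
--                 if last_comma is None:
--                     value, next_key = '', buf
--                 else:
--                     value, next_key = ''.join(buf[:last_comma]), buf[last_comma + 1:]
--                 questions[key] = value.strip().strip("'")
--                 key = ''.join(next_key).strip()
--             buf = []
--             last_comma = None
--         else:
--             if ch == ',':
--                 last_comma = len(buf)
--             buf.append(ch)
--     if key is not None:
--         questions[key] = ''.join(buf).strip().strip("'")
--     return questions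
-- ===== Notes on version B (the rewrite author's own statement) =====
-- stated objective: alternative
-- what changed: Replaces A's split-on-'=' list with indexed-loop i==0/i==len-2/else casing, per-chunk split(',') calls and a final quote-stripping pass over the dict by a single character-level state machine that never calls split: one scan over the string carrying the current key, a chunk buffer and the index of its last comma, emitting each (key, value) pair as soon as the next '=' is seen.
import Mathlib
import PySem

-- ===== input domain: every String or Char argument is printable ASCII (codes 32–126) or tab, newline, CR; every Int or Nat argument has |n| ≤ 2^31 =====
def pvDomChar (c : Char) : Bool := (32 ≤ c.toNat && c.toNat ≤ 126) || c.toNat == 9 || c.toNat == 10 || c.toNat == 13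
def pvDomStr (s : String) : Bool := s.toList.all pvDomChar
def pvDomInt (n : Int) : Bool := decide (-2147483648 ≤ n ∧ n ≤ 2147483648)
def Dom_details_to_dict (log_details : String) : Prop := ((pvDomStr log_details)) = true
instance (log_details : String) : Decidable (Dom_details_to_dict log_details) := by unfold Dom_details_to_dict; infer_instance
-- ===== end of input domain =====

set_option maxRecDepth 8000


-- B replaces A's split-on-'=' indexed loop (i==0 / i==len-2 / else casing), its per-chunk
-- split(',') calls and its final quote-stripping pass over the dict by a single character-level
-- state machine (no split at all): one scan over the string carrying the current key, the chunk
-- buffer and the index of its last comma; objective: alternative. Both are total; equivalence is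
-- proved for ALL strings in the domain.

-- ===== PORT A =====
def details_to_dict (log_details : String) : List (String × String) :=
  let ld := PySem.Str.replace (PySem.Str.replace log_details "unchecked" "0") "checked" "1"
  -- Python str.split with a nonempty separator never raises, so split? is always some
  let strings := (PySem.Str.split? ld "=").getD []
  if strings.length = 2 then
    ((PySem.Dict.empty (κ := String) (ν := String)).insert
        (PySem.Str.strip (PySem.List.pyGetD strings 0 ""))
        (PySem.Str.stripChars (PySem.Str.strip (PySem.List.pyGetD strings 1 "")) "'")).items
  else
    let qs := (PySem.List.pyRange 0 ((strings.length : Int) - 1) 1).foldl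
      (fun (d : PySem.Dict String String) (i : Int) =>
        if i = 0 then
          d.insert (PySem.Str.strip (PySem.List.pyGetD strings i ""))
            (PySem.Str.strip (PySem.Str.join ","
              (PySem.List.slice ((PySem.Str.split? (PySem.List.pyGetD strings (i + 1) "") ",").getD []) none (some (-1)))))
        else if i = (strings.length : Int) - 2 then
          d.insert (PySem.Str.strip (PySem.List.pyGetD ((PySem.Str.split? (PySem.List.pyGetD strings i "") ",").getD []) (-1) ""))
            (PySem.Str.strip (PySem.List.pyGetD strings (i + 1) ""))
        else
          d.insert (PySem.Str.strip (PySem.List.pyGetD ((PySem.Str.split? (PySem.List.pyGetD strings i "") ",").getD []) (-1) ""))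
            (PySem.Str.strip (PySem.Str.join ","
              (PySem.List.slice ((PySem.Str.split? (PySem.List.pyGetD strings (i + 1) "") ",").getD []) none (some (-1))))))
      PySem.Dict.empty
    -- 'for question in questions: questions[question] = questions[question].strip("'")'
    -- (the key is always present, so d[q] is d.getD q "")
    (qs.keys.foldl (fun (d : PySem.Dict String String) q =>
        d.insert q (PySem.Str.stripChars (d.getD q "") "'")) qs).items

-- ===== PORT B =====
-- character-level scan: state = (questions, current key (none before the first '='),
-- chunk buffer, index of the last ',' in the buffer); ''.join(buf) is String.ofList.
-- pvBStep is the loop body of Source B, pvBFin its trailing 'if key is not None' emit.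
-- B's scan step and finisher (definitionally the lambda / tail of the port)
def pvBStep (st : PySem.Dict String String × Option String × List Char × Option Nat) (ch : Char) :
    PySem.Dict String String × Option String × List Char × Option Nat :=
  if ch = '=' then
    match st.2.1 with
    | none => (st.1, some (PySem.Str.strip (String.ofList st.2.2.1)), [], none)
    | some k =>
      let vk : List Char × List Char :=
        match st.2.2.2 with
        | none => ([], st.2.2.1)
        | some i => (st.2.2.1.take i, st.2.2.1.drop (i + 1))
      (st.1.insert k (PySem.Str.stripChars (PySem.Str.strip (String.ofList vk.1)) "'"),
       some (PySem.Str.strip (String.ofList vk.2)), [], none)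
  else
    (st.1, st.2.1, st.2.2.1 ++ [ch], if ch = ',' then some st.2.2.1.length else st.2.2.2)

def pvBFin (st : PySem.Dict String String × Option String × List Char × Option Nat) :
    List (String × String) :=
  match st.2.1 with
  | none => []
  | some k => (st.1.insert k (PySem.Str.stripChars (PySem.Str.strip (String.ofList st.2.2.1)) "'")).items

def details_to_dict_alt (log_details : String) : List (String × String) :=
  let s := PySem.Str.replace (PySem.Str.replace log_details "unchecked" "0") "checked" "1"
  pvBFin (s.toList.foldl pvBStep (PySem.Dict.empty, none, [], none))

-- ===== PRECONDITION & SPEC =====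
def Spec_details_to_dict (log_details : String) (out : List (String × String)) : Prop := out = details_to_dict_alt log_details
instance (log_details : String) (out : List (String × String)) : Decidable (Spec_details_to_dict log_details out) := by unfold Spec_details_to_dict; infer_instance

-- ===== CLAIM (what is proved, stated in full; the proofs are below) =====
def Claim_equal_details_to_dict : Prop := ∀ (log_details : String), Dom_details_to_dict log_details → Spec_details_to_dict log_details (details_to_dict log_details)

-- ===== LEMMAS AND PROOFS =====

-- A's computation as a function of the split list (definitionally equal to the port's body)
def pvACore (ss : List String) : List (String × String) :=
  if ss.length = 2 then
    ((PySem.Dict.empty (κ := String) (ν := String)).insert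
        (PySem.Str.strip (PySem.List.pyGetD ss 0 ""))
        (PySem.Str.stripChars (PySem.Str.strip (PySem.List.pyGetD ss 1 "")) "'")).items
  else
    let qs := (PySem.List.pyRange 0 ((ss.length : Int) - 1) 1).foldl
      (fun (d : PySem.Dict String String) (i : Int) =>
        if i = 0 then
          d.insert (PySem.Str.strip (PySem.List.pyGetD ss i ""))
            (PySem.Str.strip (PySem.Str.join ","
              (PySem.List.slice ((PySem.Str.split? (PySem.List.pyGetD ss (i + 1) "") ",").getD []) none (some (-1)))))
        else if i = (ss.length : Int) - 2 then
          d.insert (PySem.Str.strip (PySem.List.pyGetD ((PySem.Str.split? (PySem.List.pyGetD ss i "") ",").getD []) (-1) ""))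
            (PySem.Str.strip (PySem.List.pyGetD ss (i + 1) ""))
        else
          d.insert (PySem.Str.strip (PySem.List.pyGetD ((PySem.Str.split? (PySem.List.pyGetD ss i "") ",").getD []) (-1) ""))
            (PySem.Str.strip (PySem.Str.join ","
              (PySem.List.slice ((PySem.Str.split? (PySem.List.pyGetD ss (i + 1) "") ",").getD []) none (some (-1))))))
      PySem.Dict.empty
    (qs.keys.foldl (fun (d : PySem.Dict String String) q =>
        d.insert q (PySem.Str.stripChars (d.getD q "") "'")) qs).items

theorem detailsA_eq (ld : String) :
    details_to_dict ld = pvACore ((PySem.Str.split?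
      (PySem.Str.replace (PySem.Str.replace ld "unchecked" "0") "checked" "1") "=").getD []) := rfl

theorem detailsB_eq (ld : String) :
    details_to_dict_alt ld = pvBFin ((PySem.Str.replace (PySem.Str.replace ld "unchecked" "0") "checked" "1").toList.foldl
      pvBStep (PySem.Dict.empty, none, [], none)) := rfl

-- proof-side abbreviations
def pvSq (v : String) : String := PySem.Str.stripChars v "'"
def pvKey (c : String) : String :=
  PySem.Str.strip (PySem.List.pyGetD ((PySem.Str.split? c ",").getD []) (-1) "")
def pvVal (c : String) : String :=
  PySem.Str.strip (PySem.Str.join "," (PySem.List.slice ((PySem.Str.split? c ",").getD []) none (some (-1))))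
def pvMp (p : String × String) : String × String := (p.1, pvSq p.2)

def pvPairs : String → List String → String → List (String × String)
  | k, [], sl => [(k, PySem.Str.strip sl)]
  | k, c :: cs, sl => (k, pvVal c) :: pvPairs (pvKey c) cs sl

def pvIns (d : PySem.Dict String String) (ps : List (String × String)) : PySem.Dict String String :=
  ps.foldl (fun d p => d.insert p.1 p.2) d

def pvDmap (d : PySem.Dict String String) : PySem.Dict String String :=
  PySem.Dict.mk (d.items.map pvMp)

-- the canonical value of both programs, as a function of the '='-chunks
def pvCanonD (d : PySem.Dict String String) : List String → List (String × String)
  | [] => []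
  | [_] => []
  | s0 :: c :: rest =>
    (pvIns d ((pvPairs (PySem.Str.strip s0) ((c :: rest).dropLast) ((c :: rest).getLastD "")).map pvMp)).items

-- structural split on a single character (proved equal to PySem's fueled splitOn below)
def pvSplitC (sep : Char) : List Char → List (List Char)
  | [] => [[]]
  | c :: l => if c = sep then [] :: pvSplitC sep l else List.modifyHead (c :: ·) (pvSplitC sep l)

-- index of the last ',' of a chunk (the scan's incremental last_comma)
def pvLastComma : List Char → Option Nat
  | [] => none
  | c :: l =>
    match pvLastComma l with
    | some i => some (i + 1)
    | none => if c = ',' then some 0 else none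

def pvMergeHead (buf : List Char) : List (List Char) → List (List Char)
  | [] => []
  | h :: t => (buf ++ h) :: t

-- pairs emitted by the scan, as a function of the remaining '='-chunks
def pvPairsC (k : String) : List (List Char) → List (String × String)
  | [] => []
  | [last] => [(k, PySem.Str.strip (String.ofList last))]
  | c :: c2 :: rest => (k, pvVal (String.ofList c)) :: pvPairsC (pvKey (String.ofList c)) (c2 :: rest)

-- the canonical value on char-level chunks
def pvCanonC (d : PySem.Dict String String) : List (List Char) → List (String × String)
  | [] => []
  | [_] => []
  | h :: h2 :: rest =>
    (pvIns d ((pvPairsC (PySem.Str.strip (String.ofList h)) (h2 :: rest)).map pvMp)).items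

theorem pvSplitC_ne_nil (sep : Char) (l : List Char) : pvSplitC sep l ≠ [] := by
  induction l with
  | nil => simp [pvSplitC]
  | cons c t ih =>
    simp only [pvSplitC]
    split
    · simp
    · cases h : pvSplitC sep t with
      | nil => exact absurd h ih
      | cons a b => simp [List.modifyHead]

theorem pvMergeHead_modifyHead (buf : List Char) (c : Char) (ch : List (List Char)) (h : ch ≠ []) :
    pvMergeHead buf (List.modifyHead (c :: ·) ch) = pvMergeHead (buf ++ [c]) ch := by
  cases ch with
  | nil => exact absurd rfl h
  | cons a t => simp [pvMergeHead, List.modifyHead]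

theorem pvMergeHead_nil (ch : List (List Char)) (h : ch ≠ []) : pvMergeHead [] ch = ch := by
  cases ch with
  | nil => exact absurd rfl h
  | cons a t => simp [pvMergeHead]

theorem pv_go_splitC (sep : Char) (fuel : Nat) : ∀ (l cur : List Char) (acc : List (List Char)),
    l.length ≤ fuel →
    PySem.Chars.splitOn.go [sep] fuel l cur acc
      = acc.reverse ++ pvMergeHead cur.reverse (pvSplitC sep l) := by
  induction fuel with
  | zero =>
    intro l cur acc h
    have : l = [] := List.length_eq_zero_iff.mp (Nat.le_zero.mp h)
    subst this
    rw [show PySem.Chars.splitOn.go [sep] 0 [] cur acc = ((cur.reverse ++ []) :: acc).reverse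
      from rfl]
    simp [pvSplitC, pvMergeHead]
  | succ f ih =>
    intro l cur acc h
    cases l with
    | nil =>
      rw [show PySem.Chars.splitOn.go [sep] (f + 1) [] cur acc = (cur.reverse :: acc).reverse
        from rfl]
      simp [pvSplitC, pvMergeHead]
    | cons c rest =>
      rw [show PySem.Chars.splitOn.go [sep] (f + 1) (c :: rest) cur acc
          = (if [sep].isPrefixOf (c :: rest) = true then
              PySem.Chars.splitOn.go [sep] f (List.drop [sep].length (c :: rest)) [] (cur.reverse :: acc)
            else PySem.Chars.splitOn.go [sep] f rest (c :: cur) acc) from rfl]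
      by_cases hc : c = sep
      · subst hc
        have hpre : [c].isPrefixOf (c :: rest) = true := by simp [List.isPrefixOf]
        rw [if_pos hpre]
        rw [show List.drop [c].length (c :: rest) = rest from rfl]
        rw [ih rest [] (cur.reverse :: acc) (by simpa using Nat.le_of_succ_le_succ h)]
        rw [show ([] : List Char).reverse = [] from rfl,
          pvMergeHead_nil _ (pvSplitC_ne_nil c rest)]
        rw [show pvSplitC c (c :: rest) = [] :: pvSplitC c rest by simp [pvSplitC]]
        simp [pvMergeHead]
      · have hpre : [sep].isPrefixOf (c :: rest) = false := by
          simp only [List.isPrefixOf, Bool.and_eq_false_iff, beq_eq_false_iff_ne, ne_eq]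
          exact Or.inl fun hEq => hc hEq.symm
        rw [if_neg (by simp [hpre])]
        rw [ih rest (c :: cur) acc (by simpa using Nat.le_of_succ_le_succ h)]
        simp only [pvSplitC, if_neg hc, List.reverse_cons]
        rw [pvMergeHead_modifyHead _ _ _ (pvSplitC_ne_nil sep rest)]

theorem pv_splitOn_eq (sep : Char) (l : List Char) :
    PySem.Chars.splitOn l [sep] = pvSplitC sep l := by
  unfold PySem.Chars.splitOn
  rw [pv_go_splitC sep (l.length + 1) l [] [] (by omega)]
  rw [show ([] : List Char).reverse = [] from rfl]
  rw [pvMergeHead_nil _ (pvSplitC_ne_nil sep l)]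
  rfl

theorem pv_split?_eq (s : String) (sep : Char) (sepS : String) (hs : sepS.toList = [sep]) :
    (PySem.Str.split? s sepS).getD [] = (pvSplitC sep s.toList).map String.ofList := by
  unfold PySem.Str.split? PySem.Chars.split?
  rw [hs]
  simp [pv_splitOn_eq]

theorem pvLastComma_snoc (l : List Char) (c : Char) :
    pvLastComma (l ++ [c]) = if c = ',' then some l.length else pvLastComma l := by
  induction l with
  | nil => simp [pvLastComma]
  | cons a t ih =>
    simp only [List.cons_append, pvLastComma, ih]
    by_cases hc : c = ','
    · simp [hc]
    · simp only [if_neg hc]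

theorem pvLC_none_split (cs : List Char) (h : pvLastComma cs = none) :
    pvSplitC ',' cs = [cs] := by
  induction cs with
  | nil => simp [pvSplitC]
  | cons c t ih =>
    simp only [pvLastComma] at h
    rcases ht : pvLastComma t with _ | i
    · rw [ht] at h
      by_cases hc : c = ','
      · rw [if_pos hc] at h; cases h
      · simp only [pvSplitC, if_neg hc, ih ht, List.modifyHead]
    · rw [ht] at h; cases h

theorem pv_join_modifyHead (s : List Char) (c : Char) (l : List (List Char)) (h : l ≠ []) :
    PySem.Chars.join s (List.modifyHead (c :: ·) l) = c :: PySem.Chars.join s l := by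
  cases l with
  | nil => exact absurd rfl h
  | cons p t =>
    cases t with
    | nil => simp [List.modifyHead, PySem.Chars.join_singleton]
    | cons q t' =>
      simp only [List.modifyHead, PySem.Chars.join_cons_cons, List.cons_append]

theorem pvLC_some_split (cs : List Char) : ∀ (i : Nat), pvLastComma cs = some i →
    2 ≤ (pvSplitC ',' cs).length ∧
    PySem.Chars.join [','] ((pvSplitC ',' cs).dropLast) = cs.take i ∧
    (pvSplitC ',' cs).getLastD [] = cs.drop (i + 1) := by
  induction cs with
  | nil => intro i h; cases h
  | cons c t ih =>
    intro i h
    simp only [pvLastComma] at h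
    rcases ht : pvLastComma t with _ | i'
    · -- no comma in the tail: c must be ',' and i = 0
      rw [ht] at h
      by_cases hc : c = ','
      · rw [if_pos hc] at h
        injection h with h; subst h; subst hc
        rw [pvSplitC, if_pos rfl, pvLC_none_split t ht]
        refine ⟨by simp, ?_, by simp⟩
        simp [PySem.Chars.join_singleton]
      · rw [if_neg hc] at h; cases h
    · rw [ht] at h
      injection h with h; subst h
      obtain ⟨hlen, hjoin, hlast⟩ := ih i' ht
      obtain ⟨p, ps', hps⟩ := List.exists_cons_of_ne_nil (pvSplitC_ne_nil ',' t)
      rcases ps' with _ | ⟨p2, ps''⟩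
      · rw [hps] at hlen; simp at hlen
      by_cases hc : c = ','
      · subst hc
        rw [pvSplitC, if_pos rfl, hps]
        rw [hps] at hjoin hlast
        have hjoin' : PySem.Chars.join [','] (p :: (p2 :: ps'').dropLast) = t.take i' := hjoin
        refine ⟨by simp, ?_, ?_⟩
        · show PySem.Chars.join [','] ([] :: p :: (p2 :: ps'').dropLast) = _
          rw [PySem.Chars.join_cons_cons, hjoin']
          simp [List.take_succ_cons]
        · show ((p :: p2 :: ps'').getLastD []) = List.drop (i' + 1 + 1) (',' :: t)
          rw [show List.drop (i' + 1 + 1) (',' :: t) = List.drop (i' + 1) t from rfl, hlast]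
      · rw [pvSplitC, if_neg hc, hps]
        rw [hps] at hjoin hlast
        simp only [List.modifyHead]
        have hjoin' : PySem.Chars.join [','] (p :: (p2 :: ps'').dropLast) = t.take i' := hjoin
        refine ⟨by simp, ?_, ?_⟩
        · show PySem.Chars.join [','] ((c :: p) :: (p2 :: ps'').dropLast) = _
          have hd : (c :: p) :: (p2 :: ps'').dropLast
              = List.modifyHead (c :: ·) (p :: (p2 :: ps'').dropLast) := rfl
          rw [hd, pv_join_modifyHead _ _ _ (by simp), hjoin']
          simp [List.take_succ_cons]
        · show (((c :: p) :: p2 :: ps'').getLastD []) = List.drop (i' + 1 + 1) (c :: t)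
          rw [show List.drop (i' + 1 + 1) (c :: t) = List.drop (i' + 1) t from rfl, ← hlast]
          simp

theorem pv_slice_none_negone {α : Type} (xs : List α) :
    PySem.List.slice xs none (some (-1)) = xs.dropLast := by
  cases xs with
  | nil => rfl
  | cons a l =>
    simp only [PySem.List.slice, PySem.List.clampIdx]
    rw [List.dropLast_eq_take]
    have h1 : ¬(((a :: l).length : Int) + -1 < 0) := by simp
    rw [if_pos (by norm_num), if_neg h1]
    congr 1
    simp

theorem pv_getD_concat_neg_one {α : Type} (ys : List α) (z : α) (d : α) :
    PySem.List.pyGetD (ys ++ [z]) (-1) d = z := by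
  have hn : (ys ++ [z]).length = ys.length + 1 := by simp
  simp only [PySem.List.pyGetD, PySem.List.pyGet?, PySem.List.pyIdx?, hn]
  rw [if_neg (by omega), if_pos (by push_cast; omega)]
  rw [show ys.length + 1 - (- -1 : Int).toNat = ys.length by norm_num]
  simp

theorem pv_join_ofList (qs : List (List Char)) :
    PySem.Str.join "," (qs.map String.ofList) = String.ofList (PySem.Chars.join [','] qs) := by
  unfold PySem.Str.join
  congr 1
  simp [List.map_map, Function.comp_def, String.toList_ofList]

theorem pvVal_none (cs : List Char) (h : pvLastComma cs = none) :
    pvVal (String.ofList cs) = PySem.Str.strip (String.ofList []) := by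
  unfold pvVal
  rw [pv_split?_eq _ ',' "," rfl, String.toList_ofList, pvLC_none_split cs h]
  rw [pv_slice_none_negone]
  rw [show (List.map String.ofList [cs]).dropLast = List.map String.ofList ([] : List (List Char))
    from rfl]
  rw [pv_join_ofList, PySem.Chars.join_nil]

theorem pvVal_some (cs : List Char) (i : Nat) (h : pvLastComma cs = some i) :
    pvVal (String.ofList cs) = PySem.Str.strip (String.ofList (cs.take i)) := by
  unfold pvVal
  rw [pv_split?_eq _ ',' "," rfl, String.toList_ofList]
  rw [pv_slice_none_negone, ← List.map_dropLast, pv_join_ofList]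
  rw [(pvLC_some_split cs i h).2.1]

theorem pv_getLastD_map (q : List (List Char)) (h : q ≠ []) :
    (q.map String.ofList).getLastD "" = String.ofList (q.getLastD []) := by
  rcases List.eq_nil_or_concat q with rfl | ⟨ys, z, rfl⟩
  · exact absurd rfl h
  · rw [List.concat_eq_append, List.map_append, List.map_singleton, List.getLastD_concat,
      List.getLastD_concat]

theorem pvKey_none (cs : List Char) (h : pvLastComma cs = none) :
    pvKey (String.ofList cs) = PySem.Str.strip (String.ofList cs) := by
  unfold pvKey
  rw [pv_split?_eq _ ',' "," rfl, String.toList_ofList, pvLC_none_split cs h]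
  rw [show (([cs] : List (List Char)).map String.ofList) = [] ++ [String.ofList cs] by simp]
  rw [pv_getD_concat_neg_one]

theorem pvKey_some (cs : List Char) (i : Nat) (h : pvLastComma cs = some i) :
    pvKey (String.ofList cs) = PySem.Str.strip (String.ofList (cs.drop (i + 1))) := by
  unfold pvKey
  rw [pv_split?_eq _ ',' "," rfl, String.toList_ofList]
  obtain ⟨ys, z, hyz⟩ : ∃ ys z, pvSplitC ',' cs = ys ++ [z] := by
    rcases List.eq_nil_or_concat (pvSplitC ',' cs) with hnil | ⟨ys, z, hyz⟩
    · exact absurd hnil (pvSplitC_ne_nil ',' cs)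
    · exact ⟨ys, z, by rw [hyz, List.concat_eq_append]⟩
  have hz : z = cs.drop (i + 1) := by
    have := (pvLC_some_split cs i h).2.2
    rwa [hyz, List.getLastD_concat] at this
  rw [hyz, List.map_append, List.map_singleton, pv_getD_concat_neg_one, hz]

-- B's scan, after the first '=' has fixed a key
theorem pvB_scan_keyed (l : List Char) : ∀ (d : PySem.Dict String String) (k : String) (buf : List Char),
    pvBFin (l.foldl pvBStep (d, some k, buf, pvLastComma buf))
      = (pvIns d ((pvPairsC k (pvMergeHead buf (pvSplitC '=' l))).map pvMp)).items := by
  induction l with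
  | nil =>
    intro d k buf
    simp [pvBFin, pvSplitC, pvMergeHead, pvPairsC, pvIns, pvMp, pvSq]
  | cons c t ih =>
    intro d k buf
    simp only [List.foldl_cons]
    by_cases hc : c = '='
    · subst hc
      obtain ⟨p, ps', hps⟩ := List.exists_cons_of_ne_nil (pvSplitC_ne_nil '=' t)
      rcases hlc : pvLastComma buf with _ | i
      · have hstep : pvBStep (d, some k, buf, none) '=' =
            (d.insert k (PySem.Str.stripChars (PySem.Str.strip (String.ofList [])) "'"),
             some (PySem.Str.strip (String.ofList buf)), [], pvLastComma []) := by
          simp [pvBStep, pvLastComma]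
        rw [hstep, ih]
        rw [pvMergeHead_nil _ (pvSplitC_ne_nil '=' t)]
        show _ = (pvIns d ((pvPairsC k (pvMergeHead buf ([] :: pvSplitC '=' t))).map pvMp)).items
        rw [hps]
        show _ = (pvIns d ((pvPairsC k ((buf ++ []) :: p :: ps')).map pvMp)).items
        rw [List.append_nil]
        rw [show pvPairsC k (buf :: p :: ps')
            = (k, pvVal (String.ofList buf)) :: pvPairsC (pvKey (String.ofList buf)) (p :: ps') from rfl]
        rw [pvVal_none buf hlc, pvKey_none buf hlc]
        simp [pvIns, pvMp, pvSq]
      · have hstep : pvBStep (d, some k, buf, some i) '=' =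
            (d.insert k (PySem.Str.stripChars (PySem.Str.strip (String.ofList (buf.take i))) "'"),
             some (PySem.Str.strip (String.ofList (buf.drop (i + 1)))), [], pvLastComma []) := by
          simp [pvBStep, pvLastComma]
        rw [hstep, ih]
        rw [pvMergeHead_nil _ (pvSplitC_ne_nil '=' t)]
        show _ = (pvIns d ((pvPairsC k (pvMergeHead buf ([] :: pvSplitC '=' t))).map pvMp)).items
        rw [hps]
        show _ = (pvIns d ((pvPairsC k ((buf ++ []) :: p :: ps')).map pvMp)).items
        rw [List.append_nil]
        rw [show pvPairsC k (buf :: p :: ps')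
            = (k, pvVal (String.ofList buf)) :: pvPairsC (pvKey (String.ofList buf)) (p :: ps') from rfl]
        rw [pvVal_some buf i hlc, pvKey_some buf i hlc]
        simp [pvIns, pvMp, pvSq]
    · have hstep : pvBStep (d, some k, buf, pvLastComma buf) c =
          (d, some k, buf ++ [c], pvLastComma (buf ++ [c])) := by
        simp only [pvBStep, if_neg hc]
        rw [pvLastComma_snoc]
      rw [hstep, ih]
      show _ = (pvIns d ((pvPairsC k (pvMergeHead buf (pvSplitC '=' (c :: t)))).map pvMp)).items
      rw [show pvSplitC '=' (c :: t) = List.modifyHead (c :: ·) (pvSplitC '=' t) by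
        simp [pvSplitC, hc]]
      rw [pvMergeHead_modifyHead _ _ _ (pvSplitC_ne_nil '=' t)]

-- B's scan from the initial key-less state
theorem pvB_scan_start (l : List Char) : ∀ (d : PySem.Dict String String) (buf : List Char) (lc : Option Nat),
    pvBFin (l.foldl pvBStep (d, none, buf, lc))
      = pvCanonC d (pvMergeHead buf (pvSplitC '=' l)) := by
  induction l with
  | nil =>
    intro d buf lc
    simp [pvBFin, pvSplitC, pvMergeHead, pvCanonC]
  | cons c t ih =>
    intro d buf lc
    simp only [List.foldl_cons]
    by_cases hc : c = '='
    · subst hc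
      have hstep : pvBStep (d, none, buf, lc) '=' =
          (d, some (PySem.Str.strip (String.ofList buf)), [], pvLastComma []) := by
        simp [pvBStep, pvLastComma]
      rw [hstep, pvB_scan_keyed]
      rw [pvMergeHead_nil _ (pvSplitC_ne_nil '=' t)]
      rw [show pvSplitC '=' ('=' :: t) = [] :: pvSplitC '=' t by simp [pvSplitC]]
      obtain ⟨p, ps', hps⟩ := List.exists_cons_of_ne_nil (pvSplitC_ne_nil '=' t)
      rw [hps]
      show _ = pvCanonC d ((buf ++ []) :: p :: ps')
      rw [List.append_nil]
      rfl
    · have hstep : pvBStep (d, none, buf, lc) c =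
          (d, none, buf ++ [c], if c = ',' then some buf.length else lc) := by
        simp only [pvBStep, if_neg hc]
      rw [hstep, ih]
      rw [show pvSplitC '=' (c :: t) = List.modifyHead (c :: ·) (pvSplitC '=' t) by
        simp [pvSplitC, hc]]
      rw [pvMergeHead_modifyHead _ _ _ (pvSplitC_ne_nil '=' t)]

-- the canonical char-level and string-level values agree
theorem pvPairsC_eq (q : List (List Char)) : ∀ (k : String), q ≠ [] →
    pvPairsC k q = pvPairs k ((q.dropLast).map String.ofList) (String.ofList (q.getLastD [])) := by
  induction q with
  | nil => intro k h; exact absurd rfl h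
  | cons c q' ih =>
    intro k _
    cases q' with
    | nil => rfl
    | cons c2 rest =>
      show (k, pvVal (String.ofList c)) :: pvPairsC (pvKey (String.ofList c)) (c2 :: rest) = _
      rw [ih (pvKey (String.ofList c)) (by simp)]
      have hd : (c :: c2 :: rest).dropLast = c :: (c2 :: rest).dropLast := rfl
      have hg : (c :: c2 :: rest).getLastD [] = (c2 :: rest).getLastD [] := by
        simp
      rw [hd, hg]
      rfl

theorem pvCanonC_map (d : PySem.Dict String String) (chunks : List (List Char)) :
    pvCanonD d (chunks.map String.ofList) = pvCanonC d chunks := by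
  cases chunks with
  | nil => rfl
  | cons h t =>
    cases t with
    | nil => rfl
    | cons h2 rest =>
      show (pvIns d ((pvPairs (PySem.Str.strip (String.ofList h))
          (((h2 :: rest).map String.ofList).dropLast)
          (((h2 :: rest).map String.ofList).getLastD "")).map pvMp)).items = _
      rw [show ((h2 :: rest).map String.ofList).dropLast = ((h2 :: rest).dropLast).map String.ofList
          from List.map_dropLast.symm]
      rw [pv_getLastD_map _ (by simp)]
      rw [← pvPairsC_eq _ _ (by simp)]
      rfl

-- ===== A-side lemmas (A's indexed loop reduced to the canonical form) =====

theorem pv_get_mid (s0 sl : String) (mid : List String) (j : Nat) (h1 : 1 ≤ j) (h2 : j ≤ mid.length) :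
    PySem.List.pyGetD (s0 :: mid ++ [sl]) (j : Int) "" = mid.getD (j - 1) "" := by
  rw [PySem.List.pyGetD_natCast]
  obtain ⟨j', rfl⟩ : ∃ j', j = j' + 1 := ⟨j - 1, by omega⟩
  simp [List.getD]
  rw [List.getElem?_append_left (by omega)]

theorem pv_get_last (s0 sl : String) (mid : List String) :
    PySem.List.pyGetD (s0 :: mid ++ [sl]) ((mid.length + 1 : Nat) : Int) "" = sl := by
  rw [PySem.List.pyGetD_natCast]
  simp [List.getD]

-- A's tail loop (indices 1 .. len-2) is the insert-fold over the pairs of the remaining chunks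
theorem pvA_loop (s0 sl : String) (mid : List String) :
    ∀ (kk j : Nat) (d : PySem.Dict String String), mid.length - j = kk → 1 ≤ j → j ≤ mid.length →
    (PySem.List.pyRange (j : Int) (((s0 :: mid ++ [sl]).length : Int) - 1) 1).foldl
      (fun (d : PySem.Dict String String) (i : Int) =>
        if i = 0 then
          d.insert (PySem.Str.strip (PySem.List.pyGetD (s0 :: mid ++ [sl]) i ""))
            (PySem.Str.strip (PySem.Str.join ","
              (PySem.List.slice ((PySem.Str.split? (PySem.List.pyGetD (s0 :: mid ++ [sl]) (i + 1) "") ",").getD []) none (some (-1)))))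
        else if i = (((s0 :: mid ++ [sl]).length : Int)) - 2 then
          d.insert (PySem.Str.strip (PySem.List.pyGetD ((PySem.Str.split? (PySem.List.pyGetD (s0 :: mid ++ [sl]) i "") ",").getD []) (-1) ""))
            (PySem.Str.strip (PySem.List.pyGetD (s0 :: mid ++ [sl]) (i + 1) ""))
        else
          d.insert (PySem.Str.strip (PySem.List.pyGetD ((PySem.Str.split? (PySem.List.pyGetD (s0 :: mid ++ [sl]) i "") ",").getD []) (-1) ""))
            (PySem.Str.strip (PySem.Str.join ","
              (PySem.List.slice ((PySem.Str.split? (PySem.List.pyGetD (s0 :: mid ++ [sl]) (i + 1) "") ",").getD []) none (some (-1)))))) d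
    = pvIns d (pvPairs (pvKey (mid.getD (j - 1) "")) (mid.drop j) sl) := by
  have hL : ((s0 :: mid ++ [sl]).length : Int) = (mid.length : Int) + 2 := by
    simp [List.length_append]
    omega
  intro kk
  induction kk with
  | zero =>
    intro j d hk h1 h2
    have hj : j = mid.length := by omega
    subst hj
    simp only [hL]
    rw [show (mid.length : Int) + 2 - 1 = (mid.length : Int) + 1 by ring]
    rw [PySem.List.pyRange_one_cons (by omega), PySem.List.pyRange_one_eq_nil (by omega)]
    simp only [List.foldl_cons, List.foldl_nil]
    rw [if_neg (by omega), if_pos (by omega)]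
    rw [List.drop_length]
    simp only [pvPairs]
    rw [pv_get_mid s0 sl mid mid.length h1 (le_refl _)]
    have hlast := pv_get_last s0 sl mid
    push_cast at hlast
    rw [hlast]
    simp only [pvIns, List.foldl_cons, List.foldl_nil]
    rfl
  | succ kk ih =>
    intro j d hk h1 h2
    have hjlt : j < mid.length := by omega
    simp only [hL]
    rw [show (mid.length : Int) + 2 - 1 = (mid.length : Int) + 1 by ring]
    rw [PySem.List.pyRange_one_cons (by omega)]
    simp only [List.foldl_cons]
    rw [if_neg (by omega), if_neg (by omega)]
    have hdrop : mid.drop j = mid.getD j "" :: mid.drop (j + 1) := by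
      rw [List.drop_eq_getElem_cons hjlt]
      rw [List.getD, List.getElem?_eq_getElem hjlt, Option.getD_some]
    rw [hdrop]
    simp only [pvPairs]
    simp only [pvIns, List.foldl_cons]
    have hget1 : PySem.List.pyGetD (s0 :: mid ++ [sl]) ((j : Int) + 1) "" = mid.getD j "" := by
      have := pv_get_mid s0 sl mid (j + 1) (by omega) (by omega)
      push_cast at this
      simpa using this
    have hget0 := pv_get_mid s0 sl mid j h1 (le_of_lt hjlt)
    rw [hget0, hget1]
    have hrec := ih (j + 1) (d.insert (pvKey (mid.getD (j - 1) "")) (pvVal (mid.getD j ""))) (by omega) (by omega) (by omega)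
    simp only [hL] at hrec
    rw [show ((mid.length : Int) + 2 - 1) = (mid.length : Int) + 1 by ring] at hrec
    push_cast at hrec
    simp only [pvIns] at hrec
    rw [← hrec]
    rfl

theorem pv_contains_dmap (d : PySem.Dict String String) (k : String) :
    (pvDmap d).contains k = d.contains k := by
  simp [pvDmap, PySem.Dict.contains, List.any_map, pvMp, Function.comp_def]

theorem pv_dmap_insert (d : PySem.Dict String String) (k v : String) :
    pvDmap (d.insert k v) = (pvDmap d).insert k (pvSq v) := by
  unfold PySem.Dict.insert
  rw [pv_contains_dmap]
  by_cases h : d.contains k = true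
  · simp only [h, if_pos]
    unfold pvDmap
    simp only [List.map_map]
    congr 1
    apply List.map_congr_left
    intro p _
    by_cases hk : p.1 = k <;> simp [pvMp, hk]
  · simp only [h, if_neg, Bool.false_eq_true, not_false_iff]
    unfold pvDmap
    simp [pvMp]

theorem pv_dmap_insFold (ps : List (String × String)) : ∀ (d : PySem.Dict String String),
    pvDmap (pvIns d ps) = pvIns (pvDmap d) (ps.map pvMp) := by
  induction ps with
  | nil => intro d; simp [pvIns]
  | cons p rest ih =>
    intro d
    simp only [pvIns, List.foldl_cons, List.map_cons]
    have := ih (d.insert p.1 p.2)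
    simp only [pvIns] at this ⊢
    rw [this, pv_dmap_insert]
    rfl

-- A's final quote-stripping pass maps pvSq over the values
theorem pv_strip_pass (post : List (String × String)) : ∀ (pre : List (String × String)),
    ((pre ++ post).map Prod.fst).Nodup →
    (post.map Prod.fst).foldl
      (fun (d : PySem.Dict String String) q => d.insert q (PySem.Str.stripChars (d.getD q "") "'"))
      (PySem.Dict.mk (pre.map pvMp ++ post))
    = PySem.Dict.mk ((pre ++ post).map pvMp) := by
  induction post with
  | nil => intro pre _; simp
  | cons p rest ih =>
    obtain ⟨k, v⟩ := p
    intro pre hnd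
    have hnd' : (List.map Prod.fst pre ++ k :: List.map Prod.fst rest).Nodup := by simpa using hnd
    obtain ⟨hpre, hkr, hdisj⟩ := List.nodup_append.mp hnd'
    have hkpre : ∀ q ∈ pre, q.1 ≠ k := by
      intro q hq hEq
      exact hdisj _ (List.mem_map_of_mem hq) _ List.mem_cons_self hEq
    have hkrest : ∀ q ∈ rest, q.1 ≠ k := by
      intro q hq hEq
      exact (List.nodup_cons.mp hkr).1 (by rw [← hEq]; exact List.mem_map_of_mem hq)
    simp only [List.map_cons, List.foldl_cons]
    have hget : (PySem.Dict.mk (pre.map pvMp ++ (k, v) :: rest)).getD k "" = v := by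
      simp only [PySem.Dict.getD, PySem.Dict.get?]
      rw [List.find?_append]
      have : List.find? (fun p => p.1 == k) (pre.map pvMp) = none := by
        rw [List.find?_eq_none]
        intro q hq
        obtain ⟨q0, hq0, rfl⟩ := List.mem_map.mp hq
        simpa [pvMp] using hkpre q0 hq0
      simp [this]
    have hins : (PySem.Dict.mk (pre.map pvMp ++ (k, v) :: rest)).insert k (PySem.Str.stripChars v "'")
        = PySem.Dict.mk ((pre ++ [(k, v)]).map pvMp ++ rest) := by
      unfold PySem.Dict.insert
      have hc : (PySem.Dict.mk (pre.map pvMp ++ (k, v) :: rest)).contains k = true := by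
        simp [PySem.Dict.contains]
      rw [if_pos hc]
      congr 1
      have e1 : List.map ((fun p => if p.1 = k then (k, PySem.Str.stripChars v "'") else p) ∘ pvMp) pre
          = List.map pvMp pre := by
        apply List.map_congr_left
        intro q hq
        simp [pvMp, hkpre q hq]
      have e2 : List.map (fun p => if p.1 = k then (k, PySem.Str.stripChars v "'") else p) rest
          = rest := by
        conv_rhs => rw [← List.map_id rest]
        apply List.map_congr_left
        intro q hq
        simp [hkrest q hq]
      simp [pvMp, pvSq, e1, e2]
    rw [hget, hins]
    have := ih (pre ++ [(k, v)])
    rw [List.append_assoc] at this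
    simpa using this (by simpa using hnd)

theorem pv_nodup_pvIns (ps : List (String × String)) :
    (pvIns PySem.Dict.empty ps).keys.Nodup := by
  unfold pvIns
  exact PySem.Dict.nodup_keys_foldl_insert_key ps Prod.fst (fun d p => p.2) _
    (by simp [PySem.Dict.keys, PySem.Dict.empty])

theorem pv_get_zero (s0 sl : String) (mid : List String) :
    PySem.List.pyGetD (s0 :: mid ++ [sl]) 0 "" = s0 := by
  rw [show (0 : Int) = ((0 : Nat) : Int) by norm_num, PySem.List.pyGetD_natCast]
  rfl

theorem pv_dmap_empty : pvDmap PySem.Dict.empty = PySem.Dict.empty := by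
  simp [pvDmap, PySem.Dict.empty]

-- A reduced to the canonical value of the chunk list
theorem pvA_canon (ss : List String) (h : ss ≠ []) :
    pvACore ss = pvCanonD PySem.Dict.empty ss := by
  obtain ⟨s0, rest, rfl⟩ := List.exists_cons_of_ne_nil h
  rcases List.eq_nil_or_concat rest with rfl | ⟨mid, sl, hrest⟩
  · -- a single chunk (separator absent): both are []
    show pvACore [s0] = []
    unfold pvACore
    rw [if_neg (by norm_num)]
    rw [show (([s0] : List String).length : Int) - 1 = 0 by norm_num,
      PySem.List.pyRange_one_eq_nil (le_refl 0)]
    simp [PySem.Dict.keys, PySem.Dict.empty]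
  · rw [List.concat_eq_append] at hrest
    subst hrest
    show pvACore ((s0 :: mid) ++ [sl]) = pvCanonD _ ((s0 :: mid) ++ [sl])
    by_cases hm : mid = []
    · -- exactly two chunks: A's len==2 branch
      subst hm
      unfold pvACore
      rw [if_pos (by norm_num)]
      rfl
    · -- three or more chunks
      have hml : 1 ≤ mid.length := List.length_pos_of_ne_nil hm
      have hn : (s0 :: mid ++ [sl]).length = mid.length + 2 := by simp
      unfold pvACore
      rw [if_neg (by rw [hn]; omega)]
      simp only [hn]
      -- peel index 0, then pvA_loop handles indices 1 .. len-2
      rw [PySem.List.pyRange_one_cons (by push_cast; omega)]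
      simp only [List.foldl_cons]
      simp only [if_true]
      rw [pv_get_zero]
      rw [show (0 : Int) + 1 = ((1 : Nat) : Int) by norm_num]
      rw [pv_get_mid s0 sl mid 1 (le_refl 1) hml]
      have hloop : ∀ d : PySem.Dict String String,
          (PySem.List.pyRange ((1 : Nat) : Int) (((s0 :: mid ++ [sl]).length : Int) - 1) 1).foldl _ d
          = pvIns d (pvPairs (pvKey (mid.getD (1 - 1) "")) (mid.drop 1) sl) :=
        fun d => pvA_loop s0 sl mid (mid.length - 1) 1 d rfl (le_refl 1) hml
      simp only [hn] at hloop
      rw [hloop]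
      -- the canonical value on these chunks
      obtain ⟨c, cs, rfl⟩ := List.exists_cons_of_ne_nil hm
      have hcanon : pvCanonD (PySem.Dict.empty (κ := String) (ν := String)) ((s0 :: (c :: cs)) ++ [sl])
          = (pvIns PySem.Dict.empty ((pvPairs (PySem.Str.strip s0) (c :: cs) sl).map pvMp)).items := by
        show pvCanonD _ (s0 :: c :: (cs ++ [sl])) = _
        rw [show pvCanonD (PySem.Dict.empty (κ := String) (ν := String)) (s0 :: c :: (cs ++ [sl]))
            = (pvIns PySem.Dict.empty ((pvPairs (PySem.Str.strip s0)
                ((c :: (cs ++ [sl])).dropLast) ((c :: (cs ++ [sl])).getLastD "")).map pvMp)).items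
          from rfl]
        rw [show c :: (cs ++ [sl]) = (c :: cs) ++ [sl] from rfl, List.dropLast_concat,
          List.getLastD_concat]
      rw [hcanon]
      simp only [Nat.sub_self, List.getD_cons_zero, List.drop_succ_cons, List.drop_zero]
      have hq2 : pvIns ((PySem.Dict.empty (κ := String) (ν := String)).insert (PySem.Str.strip s0)
            (PySem.Str.strip (PySem.Str.join ","
              (PySem.List.slice ((PySem.Str.split? c ",").getD []) none (some (-1))))))
            (pvPairs (pvKey c) cs sl)
          = pvIns PySem.Dict.empty (pvPairs (PySem.Str.strip s0) (c :: cs) sl) := by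
        simp only [pvPairs, pvIns, List.foldl_cons]
        rfl
      rw [hq2]
      -- A's final pass strips quotes off every stored value
      have hnd : (([] ++ (pvIns PySem.Dict.empty (pvPairs (PySem.Str.strip s0) (c :: cs) sl)).items).map
          Prod.fst).Nodup := by
        simpa [PySem.Dict.keys] using pv_nodup_pvIns (pvPairs (PySem.Str.strip s0) (c :: cs) sl)
      have hpass := pv_strip_pass (pvIns PySem.Dict.empty (pvPairs (PySem.Str.strip s0) (c :: cs) sl)).items [] hnd
      simp only [List.map_nil, List.nil_append] at hpass
      have hkeys : (pvIns PySem.Dict.empty (pvPairs (PySem.Str.strip s0) (c :: cs) sl)).keys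
          = (pvIns PySem.Dict.empty (pvPairs (PySem.Str.strip s0) (c :: cs) sl)).items.map Prod.fst := rfl
      rw [hkeys, hpass]
      -- finally commute the value map with the insert fold
      have hdm := pv_dmap_insFold (pvPairs (PySem.Str.strip s0) (c :: cs) sl) PySem.Dict.empty
      rw [pv_dmap_empty] at hdm
      simp only [pvDmap] at hdm
      rw [← hdm]

-- ===== VERDICT (by name: the statement is the Claim_ definition above) =====
theorem details_to_dict_spec : Claim_equal_details_to_dict := by
  intro ld _
  unfold Spec_details_to_dict
  rw [detailsA_eq, detailsB_eq]
  rw [pv_split?_eq _ '=' "=" rfl]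
  rw [pvA_canon _ (by
    intro hnil
    exact pvSplitC_ne_nil '=' _ (List.map_eq_nil_iff.mp hnil))]
  rw [pvCanonC_map]
  rw [pvB_scan_start]
  rw [pvMergeHead_nil _ (pvSplitC_ne_nil '=' _)]
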